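-- pv_equiv track=rewrite | github.com/oloomi/multimapping-nature-impact | divergence-of-repeated-sequences/divergence-of-repeats/kmer_counting.py | num_distinct_kmers
-- ===== SOURCE A (Python) =====
-- def rev_comp(seq):
--     seq_dict = {'A':'T', 'T':'A', 'G':'C', 'C':'G'}
--     return "".join([seq_dict[base] for base in reversed(seq)])
--
-- def num_distinct_kmers(seq, k):
--     kmer_dict = {}
--     for i in range(len(seq) - k + 1):
--         if seq[i:i + k] in kmer_dict:
--             kmer_dict[seq[i:i + k]] += 1
--             kmer_dict[rev_comp(seq[i:i + k])] += 1
--         else: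
--             kmer_dict[seq[i:i + k]] = 0
--             kmer_dict[rev_comp(seq[i:i + k])] = 0
--
--     num_distinct = 0
--     for key_kmer in kmer_dict:
--         # Counting hamming distance 1 neighbors for each distinct k-mer
--         neighbor_count = 0
--         for j in range(k):
--             # kmer_str = seq[i:i+k] with one mismatch
--             for base_iter, base in enumerate(['A', 'T', 'C', 'G']):
--                 if key_kmer[j] != base:
--                     # kmer_str = first part + mismatch + second part
--                     kmer_str = key_kmer[ : j] + base + key_kmer[j + 1 : ]
--                     if kmer_str in kmer_dict:
--                         neighbor_count = 1
--                         break
--             if neighbor_count == 1: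
--                 break
--         if neighbor_count == 0:
--             num_distinct += 1
--
--     return (len(kmer_dict), num_distinct)
-- ===== SOURCE B (Python) =====
-- def num_distinct_kmers(seq, k):
--     comp = {'A': 'T', 'T': 'A', 'G': 'C', 'C': 'G'}
--     kmers = set()
--     for i in range(len(seq) - k + 1):
--         w = seq[i:i + k]
--         kmers.add(w)
--         kmers.add("".join(comp[c] for c in reversed(w)))
--     # Bucket index: each kmer, masked at position j, lands in bucket (j, mask).
--     buckets = {}
--     for key in kmers:
--         for j in range(k):
--             m = (j, key[:j] + key[j + 1:])
--             buckets[m] = buckets.get(m, 0) + 1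
--     # A kmer has no Hamming-1 neighbour iff every one of its buckets holds only itself.
--     num_distinct = 0
--     for key in kmers:
--         if all(buckets[(j, key[:j] + key[j + 1:])] == 1 for j in range(k)):
--             num_distinct += 1
--     return (len(kmers), num_distinct)
-- ===== Notes on version B (the rewrite author's own statement) =====
-- stated objective: alternative
-- what changed: The per-kmer neighbour search (try all 3k substitutions and probe the dict for each) is replaced by a one-pass bucket index keyed by (position, kmer-with-that-position-deleted): a kmer is neighbour-free iff each of its k buckets has size 1.
import Mathlib
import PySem

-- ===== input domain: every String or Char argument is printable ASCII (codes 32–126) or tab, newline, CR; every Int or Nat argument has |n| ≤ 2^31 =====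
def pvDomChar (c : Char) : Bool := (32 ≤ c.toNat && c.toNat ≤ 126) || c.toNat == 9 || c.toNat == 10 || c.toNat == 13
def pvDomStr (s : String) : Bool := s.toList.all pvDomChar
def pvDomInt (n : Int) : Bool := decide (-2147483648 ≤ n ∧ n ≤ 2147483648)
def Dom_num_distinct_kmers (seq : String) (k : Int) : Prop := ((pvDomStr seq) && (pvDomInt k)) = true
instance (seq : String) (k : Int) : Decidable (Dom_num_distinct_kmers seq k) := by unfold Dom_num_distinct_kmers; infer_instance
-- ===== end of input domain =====

-- B replaces A's per-kmer neighbour probing (all 3k substitutions, each looked up in the dict)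
-- by a bucket index keyed by (position, kmer with that position deleted): a kmer is
-- neighbour-free iff each of its buckets holds only itself (alternative algorithm).


-- ===== PORT A =====
-- rev_comp: "".join([seq_dict[base] for base in reversed(seq)]); a base outside the dict is a
-- Python KeyError — those inputs are excluded by Pre_ (the default returned there is the base itself).
def rev_comp (s : List Char) : List Char :=
  let seq_dict : PySem.Dict Char Char :=
    PySem.Dict.ofList [('A', 'T'), ('T', 'A'), ('G', 'C'), ('C', 'G')]
  s.reverse.map (fun base => seq_dict.getD base base)

def num_distinct_kmers (seq : String) (k : Int) : Int × Int :=
  let cs := seq.toList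
  let kmer_dict : PySem.Dict (List Char) Int :=
    (PySem.List.pyRange 0 ((cs.length : Int) - k + 1) 1).foldl (fun d i =>
      let w := PySem.List.slice cs (some i) (some (i + k))
      if d.contains w then
        -- kmer_dict[...] += 1 (both keys are present there; modify is exact)
        (d.modify w 0 (· + 1)).modify (rev_comp w) 0 (· + 1)
      else
        (d.insert w 0).insert (rev_comp w) 0) PySem.Dict.empty
  let num_distinct : Int :=
    kmer_dict.keys.foldl (fun num key_kmer =>
      let neighbor_count : Int :=
        (PySem.List.pyRange 0 k 1).foldl (fun nc j =>
          if nc == 1 then nc  -- 'if neighbor_count == 1: break'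
          else
            ['A', 'T', 'C', 'G'].foldl (fun nc base =>
              if nc == 1 then nc  -- 'break' after a hit
              else if PySem.List.pyGetD key_kmer j ' ' ≠ base then
                -- key_kmer[j] is in range (keys have length k when k ≥ 1); default ' ' unreachable
                (if kmer_dict.contains
                    (PySem.List.slice key_kmer none (some j) ++ [base] ++
                     PySem.List.slice key_kmer (some (j + 1)) none) then 1 else nc)
              else nc) nc) 0
      if neighbor_count == 0 then num + 1 else num) 0
  ((kmer_dict.size : Int), num_distinct)

-- ===== PORT B =====
def rev_comp_alt (s : List Char) : List Char :=
  let comp : PySem.Dict Char Char :=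
    PySem.Dict.ofList [('A', 'T'), ('T', 'A'), ('G', 'C'), ('C', 'G')]
  s.reverse.map (fun c => comp.getD c c)

-- key[:j] + key[j+1:]
def pvMaskAt (key : List Char) (j : Int) : List Char :=
  PySem.List.slice key none (some j) ++ PySem.List.slice key (some (j + 1)) none

def num_distinct_kmers_alt (seq : String) (k : Int) : Int × Int :=
  let cs := seq.toList
  let kmers : PySem.Set (List Char) :=
    (PySem.List.pyRange 0 ((cs.length : Int) - k + 1) 1).foldl (fun s i =>
      let w := PySem.List.slice cs (some i) (some (i + k))
      PySem.Set.add (PySem.Set.add s w) (rev_comp_alt w)) PySem.Set.empty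
  let buckets : PySem.Dict (Int × List Char) Int :=
    kmers.foldl (fun d key =>
      (PySem.List.pyRange 0 k 1).foldl (fun d j =>
        d.insert (j, pvMaskAt key j) (d.getD (j, pvMaskAt key j) 0 + 1)) d) PySem.Dict.empty
  let num_distinct : Int :=
    kmers.foldl (fun num key =>
      -- buckets[(j, mask)] always exists for a bucketed key; default 0 unreachable
      if (PySem.List.pyRange 0 k 1).all
          (fun j => buckets.getD (j, pvMaskAt key j) 0 == 1) then num + 1 else num) 0
  (PySem.Set.len kmers, num_distinct)

-- ===== PRECONDITION & SPEC =====
def pvBases : List Char := ['A', 'T', 'C', 'G']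

-- Pre_ excludes exactly the inputs on which A raises KeyError in rev_comp: a character outside
-- 'ACGT' occurring in some window seq[i:i+k] (for 1 ≤ k ≤ len(seq) the windows cover all of seq;
-- for k ≤ -1 with len(seq)+k ≥ 1 they cover all but the last character; otherwise every window is empty).
def Pre_num_distinct_kmers (seq : String) (k : Int) : Prop :=
  let cs := seq.toList
  let covered : List Char :=
    if 1 ≤ k then (if k ≤ (cs.length : Int) then cs else [])
    else if k ≤ -1 ∧ 1 ≤ (cs.length : Int) + k then cs.take (cs.length - 1)
    else []
  covered.all (fun c => pvBases.contains c) = true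
instance (seq : String) (k : Int) : Decidable (Pre_num_distinct_kmers seq k) := by
  unfold Pre_num_distinct_kmers; infer_instance

def pvWitness_num_distinct_kmers : String × Int := ("ACGTAC", 2)

def Spec_num_distinct_kmers (seq : String) (k : Int) (out : Int × Int) : Prop :=
  out = num_distinct_kmers_alt seq k
instance (seq : String) (k : Int) (out : Int × Int) : Decidable (Spec_num_distinct_kmers seq k out) := by
  unfold Spec_num_distinct_kmers; infer_instance

-- ===== CLAIM (what is proved, stated in full; the proofs are below) =====
def Claim_equal_num_distinct_kmers : Prop :=
  ∀ (seq : String) (k : Int), Dom_num_distinct_kmers seq k → Pre_num_distinct_kmers seq k →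
    Spec_num_distinct_kmers seq k (num_distinct_kmers seq k)

-- ===== LEMMAS AND PROOFS =====

-- proof-side views of the two first loops' step functions
def pvStepA (d : PySem.Dict (List Char) Int) (w : List Char) : PySem.Dict (List Char) Int :=
  if d.contains w then (d.modify w 0 (· + 1)).modify (rev_comp w) 0 (· + 1)
  else (d.insert w 0).insert (rev_comp w) 0

def pvStepB (s : PySem.Set (List Char)) (w : List Char) : PySem.Set (List Char) :=
  PySem.Set.add (PySem.Set.add s w) (rev_comp_alt w)

-- a good window: all its characters are bases and (for k ≥ 1) it has length k
def pvGood (k : Int) (w : List Char) : Prop :=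
  (∀ c ∈ w, c ∈ pvBases) ∧ (1 ≤ k → w.length = k.toNat)

-- the joint invariant of the two first loops
def pvInv (k : Int) (d : PySem.Dict (List Char) Int) (s : PySem.Set (List Char)) : Prop :=
  d.keys = s ∧ List.Nodup s ∧ ∀ y ∈ s, pvGood k y ∧ rev_comp y ∈ s

def pvWindows (cs : List Char) (k : Int) : List (List Char) :=
  (PySem.List.pyRange 0 ((cs.length : Int) - k + 1) 1).map
    (fun i => PySem.List.slice cs (some i) (some (i + k)))

-- A's neighbour condition for one key, as a Bool
def pvHasNb (d : PySem.Dict (List Char) Int) (k : Int) (x : List Char) : Bool :=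
  (PySem.List.pyRange 0 k 1).any (fun j =>
    pvBases.any (fun base =>
      (decide (PySem.List.pyGetD x j ' ' ≠ base)) &&
      d.contains (PySem.List.slice x none (some j) ++ [base] ++
        PySem.List.slice x (some (j + 1)) none)))

-- B's bucket dictionary built from a key list
def pvBuckets (K : List (List Char)) (k : Int) : PySem.Dict (Int × List Char) Int :=
  K.foldl (fun d key =>
    (PySem.List.pyRange 0 k 1).foldl (fun d j =>
      d.insert (j, pvMaskAt key j) (d.getD (j, pvMaskAt key j) 0 + 1)) d) PySem.Dict.empty

lemma rev_comp_base {c : Char} (h : c ∈ pvBases) :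
    (PySem.Dict.ofList [('A', 'T'), ('T', 'A'), ('G', 'C'), ('C', 'G')]).getD c c ∈ pvBases ∧
    (PySem.Dict.ofList [('A', 'T'), ('T', 'A'), ('G', 'C'), ('C', 'G')]).getD
      ((PySem.Dict.ofList [('A', 'T'), ('T', 'A'), ('G', 'C'), ('C', 'G')]).getD c c)
      ((PySem.Dict.ofList [('A', 'T'), ('T', 'A'), ('G', 'C'), ('C', 'G')]).getD c c) = c := by
  fin_cases h <;> exact ⟨by decide, by decide⟩

lemma rev_comp_length (w : List Char) : (rev_comp w).length = w.length := by
  simp [rev_comp]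

lemma rev_comp_mem {w : List Char} (h : ∀ c ∈ w, c ∈ pvBases) :
    ∀ c ∈ rev_comp w, c ∈ pvBases := by
  intro c hc
  simp only [rev_comp, List.mem_map, List.mem_reverse] at hc
  obtain ⟨b, hb, rfl⟩ := hc
  exact (rev_comp_base (h b hb)).1

lemma rev_comp_rev_comp {w : List Char} (h : ∀ c ∈ w, c ∈ pvBases) :
    rev_comp (rev_comp w) = w := by
  simp only [rev_comp, List.map_reverse, List.reverse_reverse, List.map_map]
  calc w.map _ = w.map id := by
        apply List.map_congr_left
        intro c hc
        exact (rev_comp_base (h c hc)).2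
    _ = w := List.map_id w

lemma pvGood_rev_comp {k : Int} {w : List Char} (h : pvGood k w) : pvGood k (rev_comp w) :=
  ⟨rev_comp_mem h.1, fun hk => (rev_comp_length w).trans (h.2 hk)⟩

lemma rev_comp_alt_eq (w : List Char) : rev_comp_alt w = rev_comp w := rfl

lemma pvInv_step {k : Int} {d : PySem.Dict (List Char) Int} {s : PySem.Set (List Char)}
    {w : List Char} (hw : pvGood k w) (h : pvInv k d s) : pvInv k (pvStepA d w) (pvStepB s w) := by
  obtain ⟨hkeys, hnd, hmem⟩ := h
  unfold pvStepA pvStepB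
  rw [rev_comp_alt_eq]
  by_cases hws : w ∈ (s : List (List Char))
  · have hc : d.contains w = true := (PySem.Dict.contains_iff_mem_keys d w).mpr (hkeys ▸ hws)
    have hrc : rev_comp w ∈ (s : List (List Char)) := (hmem w hws).2
    rw [if_pos hc]
    have hrck : rev_comp w ∈ d.keys := by rw [hkeys]; exact hrc
    have hcm : (d.modify w 0 (· + 1)).contains (rev_comp w) = true := by
      rw [PySem.Dict.contains_modify, (PySem.Dict.contains_iff_mem_keys d (rev_comp w)).mpr hrck]
      simp
    have h1 : ((d.modify w 0 (· + 1)).modify (rev_comp w) 0 (· + 1)).keys = d.keys := by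
      rw [PySem.Dict.keys_modify, PySem.Dict.keys_insert_of_contains _ _ hcm,
        PySem.Dict.keys_modify, PySem.Dict.keys_insert_of_contains _ _ hc]
    rw [PySem.Set.add_of_mem hws, PySem.Set.add_of_mem hrc]
    exact ⟨h1.trans hkeys, hnd, hmem⟩
  · have hc : d.contains w = false := by
      rw [← Bool.not_eq_true, PySem.Dict.contains_iff_mem_keys, hkeys]
      exact hws
    have hrcn : rev_comp w ∉ (s : List (List Char)) := by
      intro hin
      have h2 := (hmem _ hin).2
      rw [rev_comp_rev_comp hw.1] at h2
      exact hws h2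
    rw [if_neg (by simp [hc])]
    have hk1 : ((d.insert w 0)).keys = s ++ [w] := by
      rw [PySem.Dict.keys_insert_of_not_contains d 0 hc, hkeys]
    by_cases hrw : rev_comp w = w
    · have hck : (d.insert w 0).contains (rev_comp w) = true := by
        rw [hrw, PySem.Dict.contains_insert]; simp
      have hks : ((d.insert w 0).insert (rev_comp w) 0).keys = s ++ [w] := by
        rw [PySem.Dict.keys_insert_of_contains _ _ hck, hk1]
      have hmw : rev_comp w ∈ s ++ [w] := by
        rw [hrw]
        exact List.mem_append_right s (List.mem_singleton_self w)
      rw [PySem.Set.add_of_not_mem hws, PySem.Set.add_of_mem hmw]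
      have hnodup : List.Nodup (s ++ [w]) := by
        rw [List.nodup_append]
        refine ⟨hnd, List.nodup_singleton w, ?_⟩
        intro a ha b hb
        have hbw : b = w := by simpa using hb
        subst hbw
        exact fun h => hws (h ▸ ha)
      refine ⟨hks, hnodup, ?_⟩
      intro y hy
      rcases List.mem_append.mp hy with hy' | hy'
      · exact ⟨(hmem y hy').1, List.mem_append_left _ (hmem y hy').2⟩
      · rw [List.mem_singleton.mp hy']
        exact ⟨hw, by rw [hrw]; simp⟩
    · have hck : (d.insert w 0).contains (rev_comp w) = false := by
        rw [PySem.Dict.contains_insert]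
        simp [hrw, ← Bool.not_eq_true, PySem.Dict.contains_iff_mem_keys, hkeys, hrcn]
      have hks : ((d.insert w 0).insert (rev_comp w) 0).keys = s ++ [w] ++ [rev_comp w] := by
        rw [PySem.Dict.keys_insert_of_not_contains _ _ hck, hk1]
      have hnw : rev_comp w ∉ s ++ [w] := by simp [hrcn, hrw]
      rw [PySem.Set.add_of_not_mem hws, PySem.Set.add_of_not_mem hnw]
      refine ⟨hks, ?_, ?_⟩
      · simp only [List.append_assoc]
        rw [List.nodup_append]
        refine ⟨hnd, ?_, ?_⟩
        · have h2 : w ∉ [rev_comp w] := by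
            simp only [List.mem_singleton]
            exact fun h => hrw h.symm
          simp [List.nodup_cons, h2]
        · intro a ha b hb
          have hab : b = w ∨ b = rev_comp w := by simpa using hb
          rcases hab with rfl | rfl
          · exact fun h => hws (h ▸ ha)
          · exact fun h => hrcn (h ▸ ha)
      intro y hy
      simp only [List.append_assoc, List.mem_append, List.mem_singleton] at hy
      rcases hy with hy' | hy' | hy'
      · refine ⟨(hmem y hy').1, by simp [List.mem_append_left, (hmem y hy').2]⟩
      · subst hy'
        exact ⟨hw, by simp⟩
      · subst hy'
        exact ⟨pvGood_rev_comp hw, by simp [rev_comp_rev_comp hw.1]⟩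

lemma pvInv_foldl {k : Int} (ws : List (List Char)) (hws : ∀ w ∈ ws, pvGood k w)
    {d : PySem.Dict (List Char) Int} {s : PySem.Set (List Char)} (h : pvInv k d s) :
    pvInv k (ws.foldl pvStepA d) (ws.foldl pvStepB s) := by
  induction ws generalizing d s with
  | nil => exact h
  | cons w ws ih =>
    exact ih (fun v hv => hws v (List.mem_cons_of_mem _ hv))
      (pvInv_step (hws w List.mem_cons_self) h)

lemma pvWindows_good {seq : String} {k : Int} (hpre : Pre_num_distinct_kmers seq k) :
    ∀ w ∈ pvWindows seq.toList k, pvGood k w := by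
  intro w hw
  simp only [pvWindows, List.mem_map] at hw
  obtain ⟨i, hi, rfl⟩ := hw
  rw [PySem.List.mem_pyRange_one] at hi
  obtain ⟨hi0, hiN⟩ := hi
  set cs := seq.toList with hcs
  set n := cs.length with hn
  have hslice : PySem.List.slice cs (some i) (some (i + k)) =
      (cs.drop (PySem.List.clampIdx n i)).take
        (PySem.List.clampIdx n (i + k) - PySem.List.clampIdx n i) := rfl
  have ha : PySem.List.clampIdx n i = min i.toNat n := by
    simp only [PySem.List.clampIdx, if_neg (not_lt.mpr hi0)]
  unfold Pre_num_distinct_kmers at hpre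
  simp only at hpre
  rw [List.all_eq_true] at hpre
  replace hpre : ∀ c ∈ (if 1 ≤ k then (if k ≤ (seq.toList.length : Int) then seq.toList else [])
      else if k ≤ -1 ∧ 1 ≤ (seq.toList.length : Int) + k then
        seq.toList.take (seq.toList.length - 1)
      else []), c ∈ pvBases := by
    intro c hc
    have h := hpre c hc
    simpa using h
  constructor
  · -- all characters are bases
    intro c hc
    rw [hslice] at hc
    by_cases h1k : 1 ≤ k
    · by_cases hkn : k ≤ (n : Int)
      · apply hpre
        rw [if_pos h1k, if_pos hkn]
        exact List.drop_subset _ _ (List.take_subset _ _ hc)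
      · exfalso; omega
    · -- k ≤ 0
      push_neg at h1k
      set a := PySem.List.clampIdx n i with hadef
      set b := PySem.List.clampIdx n (i + k) with hbdef
      rcases Nat.lt_or_ge a b with hab | hab
      · -- nonempty window
        have hik : i + k < 0 := by
          by_contra hik
          push_neg at hik
          have hb : b = min (i + k).toNat n := by
            rw [hbdef]
            simp only [PySem.List.clampIdx, if_neg (not_lt.mpr hik)]
          omega
        rcases lt_or_ge ((n : Int) + (i + k)) 0 with hs | hs
        · exfalso
          have hb0 : b = 0 := by
            rw [hbdef]
            simp only [PySem.List.clampIdx, if_pos hik, if_pos hs]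
          omega
        have hb : b = ((n : Int) + (i + k)).toNat := by
          rw [hbdef]
          simp only [PySem.List.clampIdx, if_pos hik, if_neg (not_lt.mpr hs)]
        have hkneg : k ≤ -1 := by omega
        have hnk : 1 ≤ (n : Int) + k := by omega
        have hbn : b ≤ n - 1 := by omega
        have hcb : c ∈ cs.take b := by
          have ht := List.take_add (l := cs) (i := a) (j := b - a)
          have hb' : a + (b - a) = b := by omega
          rw [hb'] at ht
          rw [ht]
          exact List.mem_append_right _ hc
        apply hpre
        rw [if_neg (by omega), if_pos ⟨hkneg, hnk⟩]
        have hbt : cs.take b = (cs.take (n - 1)).take b := by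
          rw [List.take_take]
          congr 1
          omega
        rw [hbt] at hcb
        exact List.take_subset _ _ hcb
      · -- empty window
        exfalso
        have hba : b - a = 0 := by omega
        rw [hba] at hc
        simp at hc
  · -- length: only needed for 1 ≤ k
    intro h1k
    have hkn : k ≤ (n : Int) := by
      by_contra hkn
      push_neg at hkn
      omega
    have hik0 : 0 ≤ i + k := by omega
    have hb : PySem.List.clampIdx n (i + k) = min (i + k).toNat n := by
      simp only [PySem.List.clampIdx, if_neg (not_lt.mpr hik0)]
    rw [hslice, List.length_take, List.length_drop, ha, hb]
    omega

-- generic 'break' fold over an Int flag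
lemma pvBreakFold {α : Type} (l : List α) (p : α → Bool) (nc : Int) :
    l.foldl (fun nc a => if nc == 1 then nc else if p a then 1 else nc) nc =
      if nc == 1 then nc else if l.any p then 1 else nc := by
  induction l generalizing nc with
  | nil => simp
  | cons a t ih =>
    rw [List.foldl_cons, ih]
    by_cases h1 : nc = (1 : Int) <;> by_cases hp : p a <;>
      by_cases ht : t.any p <;> simp [h1, hp, ht]

-- A's inner double loop computes 'if pvHasNb then 1 else 0'
lemma pvNcEq (d : PySem.Dict (List Char) Int) (k : Int) (x : List Char) :
    (PySem.List.pyRange 0 k 1).foldl (fun nc j =>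
      if nc == 1 then nc
      else
        ['A', 'T', 'C', 'G'].foldl (fun nc base =>
          if nc == 1 then nc
          else if PySem.List.pyGetD x j ' ' ≠ base then
            (if d.contains (PySem.List.slice x none (some j) ++ [base] ++
                PySem.List.slice x (some (j + 1)) none) then 1 else nc)
          else nc) nc) (0 : Int)
    = if pvHasNb d k x then 1 else 0 := by
  have hinner : ∀ (j nc : Int),
      ['A', 'T', 'C', 'G'].foldl (fun nc base =>
        if nc == 1 then nc
        else if PySem.List.pyGetD x j ' ' ≠ base then
          (if d.contains (PySem.List.slice x none (some j) ++ [base] ++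
              PySem.List.slice x (some (j + 1)) none) then 1 else nc)
        else nc) nc
      = if nc == 1 then nc
        else if pvBases.any (fun base =>
            (decide (PySem.List.pyGetD x j ' ' ≠ base)) &&
            d.contains (PySem.List.slice x none (some j) ++ [base] ++
              PySem.List.slice x (some (j + 1)) none)) then 1 else nc := by
    intro j nc
    have hbody : (fun (nc : Int) base =>
        if nc == 1 then nc
        else if PySem.List.pyGetD x j ' ' ≠ base then
          (if d.contains (PySem.List.slice x none (some j) ++ [base] ++
              PySem.List.slice x (some (j + 1)) none) then 1 else nc)
        else nc)
        = (fun (nc : Int) base =>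
            if nc == 1 then nc
            else if ((decide (PySem.List.pyGetD x j ' ' ≠ base)) &&
                d.contains (PySem.List.slice x none (some j) ++ [base] ++
                  PySem.List.slice x (some (j + 1)) none)) then 1 else nc) := by
      funext nc b
      by_cases h1 : nc == 1
      · simp [h1]
      · by_cases h2 : PySem.List.pyGetD x j ' ' ≠ b
        · by_cases h3 : d.contains (PySem.List.slice x none (some j) ++ [b] ++
              PySem.List.slice x (some (j + 1)) none) <;> simp [h1, h2, h3]
        · simp [h1, h2]
    rw [show (['A', 'T', 'C', 'G'] : List Char) = pvBases from rfl, hbody]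
    exact pvBreakFold pvBases _ nc
  have houter : (fun (nc j : Int) =>
      if nc == 1 then nc
      else
        ['A', 'T', 'C', 'G'].foldl (fun nc base =>
          if nc == 1 then nc
          else if PySem.List.pyGetD x j ' ' ≠ base then
            (if d.contains (PySem.List.slice x none (some j) ++ [base] ++
                PySem.List.slice x (some (j + 1)) none) then 1 else nc)
          else nc) nc)
      = (fun (nc j : Int) =>
          if nc == 1 then nc
          else if pvBases.any (fun base =>
              (decide (PySem.List.pyGetD x j ' ' ≠ base)) &&
              d.contains (PySem.List.slice x none (some j) ++ [base] ++
                PySem.List.slice x (some (j + 1)) none)) then 1 else nc) := by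
    funext nc j
    cases h1 : (nc == 1 : Bool) <;> simp only [h1, hinner, if_true, if_false, Bool.false_eq_true,
      Bool.true_eq_false, ite_true, ite_false]
  rw [houter, pvBreakFold]
  simp [pvHasNb]

-- the nested bucket loop is a Counter over the flattened (position, mask) list
lemma pvBuckets_getD (K : List (List Char)) (k : Int) (q : Int × List Char) :
    (pvBuckets K k).getD q 0 =
      ((K.flatMap (fun y => (PySem.List.pyRange 0 k 1).map (fun j => (j, pvMaskAt y j)))).count q
        : Int) := by
  have h1 : pvBuckets K k =
      (K.flatMap (fun y => (PySem.List.pyRange 0 k 1).map (fun j => (j, pvMaskAt y j)))).foldl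
        (fun d m => d.insert m (d.getD m 0 + 1)) PySem.Dict.empty := by
    rw [List.foldl_flatMap]
    unfold pvBuckets
    simp only [List.foldl_map]
  rw [h1, PySem.Dict.foldl_insert_getD_add_one_eq_counter, PySem.Dict.getD_counter]

-- countP of a predicate that can only hold at one designated member of a Nodup list
lemma pvCountP_site {α : Type} [DecidableEq α] (l : List α) (j : α) (q : α → Bool)
    (hnd : l.Nodup) (hj : j ∈ l) :
    l.countP (fun x => decide (x = j) && q x) = if q j then 1 else 0 := by
  induction l with
  | nil => cases hj
  | cons a t ih =>
    rcases List.mem_cons.mp hj with heq | hj'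
    · subst heq
      have hat : j ∉ t := (List.nodup_cons.mp hnd).1
      have hz : t.countP (fun x => decide (x = j) && q x) = 0 := by
        rw [List.countP_eq_zero]
        intro x hx
        simp only [Bool.and_eq_true, decide_eq_true_eq, not_and]
        intro heq'
        exact absurd (heq' ▸ hx) hat
      by_cases hq : q j <;> simp [List.countP_cons, hz, hq]
    · have hne : a ≠ j := by
        rintro rfl; exact (List.nodup_cons.mp hnd).1 hj'
      rw [List.countP_cons, ih (List.nodup_cons.mp hnd).2 hj']
      simp [hne]

lemma pvSum_ite {α : Type} (l : List α) (p : α → Bool) :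
    (l.map (fun y => if p y then 1 else 0)).sum = l.countP p := by
  induction l with
  | nil => rfl
  | cons a t ih =>
    by_cases h : p a <;> simp [List.countP_cons, h, ih] <;> omega

-- count of (j, mask x j) in the flattened list = number of keys sharing x's mask at j
lemma pvCount_flat (K : List (List Char)) (k : Int) (x : List Char) (j : Int)
    (hj : j ∈ PySem.List.pyRange 0 k 1) :
    (K.flatMap (fun y => (PySem.List.pyRange 0 k 1).map (fun j' => (j', pvMaskAt y j')))).count
        (j, pvMaskAt x j)
      = K.countP (fun y => pvMaskAt y j == pvMaskAt x j) := by
  rw [List.count_flatMap]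
  have hinner : ∀ y : List Char,
      (List.count (j, pvMaskAt x j) ∘ fun y =>
        (PySem.List.pyRange 0 k 1).map (fun j' => (j', pvMaskAt y j'))) y
      = if pvMaskAt y j == pvMaskAt x j then 1 else 0 := by
    intro y
    simp only [Function.comp_apply, List.count_eq_countP, List.countP_map]
    have hpred : ((fun b => b == (j, pvMaskAt x j)) ∘ fun j' => (j', pvMaskAt y j'))
        = fun j' => decide (j' = j) && (pvMaskAt y j' == pvMaskAt x j) := by
      funext j'
      simp only [Function.comp_apply, Prod.mk.injEq, beq_iff_eq, Bool.and_eq_true,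
        decide_eq_true_eq]
      by_cases h1 : j' = j <;> by_cases h2 : pvMaskAt y j' = pvMaskAt x j <;>
        simp [h1, h2]
    rw [hpred, pvCountP_site _ j _ (PySem.List.nodup_pyRange_one 0 k) hj]
  rw [List.map_congr_left (fun y _ => hinner y), pvSum_ite]

-- countP = 1 iff the designated satisfying member is the only one
lemma pvCountP_eq_one {α : Type} (l : List α) (p : α → Bool) (x : α)
    (hnd : l.Nodup) (hx : x ∈ l) (hpx : p x = true) :
    (l.countP p = 1 ↔ ∀ y ∈ l, p y = true → y = x) := by
  classical
  rw [List.countP_eq_length_filter]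
  constructor
  · intro h1 y hy hpy
    by_contra hne
    have hx' : x ∈ l.filter p := List.mem_filter.mpr ⟨hx, hpx⟩
    have hy' : y ∈ l.filter p := List.mem_filter.mpr ⟨hy, hpy⟩
    have he := List.length_erase_of_mem hx'
    have hy'' : y ∈ (l.filter p).erase x := (List.mem_erase_of_ne hne).mpr hy'
    have h2 : 0 < ((l.filter p).erase x).length := List.length_pos_of_mem hy''
    omega
  · intro h
    have hall : ∀ b ∈ l.filter p, b = x := fun b hb =>
      h b (List.mem_filter.mp hb).1 (List.mem_filter.mp hb).2
    have hrep := List.eq_replicate_of_mem hall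
    have hndf : (l.filter p).Nodup := hnd.filter p
    rw [hrep, List.nodup_replicate] at hndf
    have hx' : x ∈ l.filter p := List.mem_filter.mpr ⟨hx, hpx⟩
    have h2 : 0 < (l.filter p).length := List.length_pos_of_mem hx'
    omega

-- the Hamming-1 bridge: A's substitution probe vs B's shared-mask criterion
lemma pvBridge (K : List (List Char)) (k : Int) (x : List Char) (j : Int)
    (hmem : ∀ y ∈ K, pvGood k y) (hx : x ∈ K) (hj0 : 0 ≤ j) (hjk : j < k) :
    (∃ b ∈ pvBases, PySem.List.pyGetD x j ' ' ≠ b ∧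
        (PySem.List.slice x none (some j) ++ [b] ++
          PySem.List.slice x (some (j + 1)) none) ∈ K)
      ↔ ∃ y ∈ K, y ≠ x ∧ pvMaskAt y j = pvMaskAt x j := by
  have h1k : (1 : Int) ≤ k := by omega
  have hlen : x.length = k.toNat := (hmem x hx).2 h1k
  have hjn : j.toNat < x.length := by omega
  have hj1 : (j + 1).toNat = j.toNat + 1 := by omega
  have hget : PySem.List.pyGetD x j ' ' = x[j.toNat] :=
    PySem.List.pyGetD_eq_getElem x ' ' hj0 (by omega)
  have hsl : ∀ z : List Char, PySem.List.slice z none (some j) = z.take j.toNat :=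
    fun z => PySem.List.slice_to z hj0
  have hsr : ∀ z : List Char, PySem.List.slice z (some (j + 1)) none = z.drop (j.toNat + 1) := by
    intro z
    rw [PySem.List.slice_from z (by omega), hj1]
  have hmask : ∀ z : List Char, pvMaskAt z j = z.take j.toNat ++ z.drop (j.toNat + 1) := by
    intro z
    unfold pvMaskAt
    rw [hsl, hsr]
  have htl : (x.take j.toNat).length = j.toNat := by
    rw [List.length_take]; omega
  constructor
  · rintro ⟨b, hb, hne, hcand⟩
    rw [hsl, hsr] at hcand
    have hclen : (x.take j.toNat ++ [b] ++ x.drop (j.toNat + 1)).length = x.length := by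
      simp; omega
    have hgetc : (x.take j.toNat ++ [b] ++ x.drop (j.toNat + 1))[j.toNat]'(by omega) = b := by
      simp [List.getElem_append, htl]
    refine ⟨_, hcand, ?_, ?_⟩
    · intro heq
      apply hne
      rw [hget]
      exact (List.getElem_of_eq heq.symm hjn).trans hgetc
    · rw [hmask, hmask]
      have h2 : (x.take j.toNat ++ [b] ++ x.drop (j.toNat + 1)).drop (j.toNat + 1)
          = x.drop (j.toNat + 1) := by
        have hl : (x.take j.toNat ++ [b]).length = j.toNat + 1 := by simp [htl]
        rw [← hl, List.drop_left]
      have h3 : (x.take j.toNat ++ [b] ++ x.drop (j.toNat + 1)).take j.toNat = x.take j.toNat := by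
        rw [List.append_assoc, List.take_append_of_le_length (by omega), List.take_take]
        congr 1
        omega
      rw [h2, h3]
  · rintro ⟨y, hy, hyx, hmaskeq⟩
    have hylen : y.length = k.toNat := (hmem y hy).2 h1k
    have hjy : j.toNat < y.length := by omega
    rw [hmask, hmask] at hmaskeq
    have hlens : (y.take j.toNat).length = (x.take j.toNat).length := by
      rw [List.length_take, List.length_take]; omega
    obtain ⟨htake, hdrop⟩ := List.append_inj hmaskeq hlens
    have hb : y[j.toNat] ∈ pvBases := (hmem y hy).1 _ (List.getElem_mem hjy)
    have hydec : y = y.take j.toNat ++ [y[j.toNat]] ++ y.drop (j.toNat + 1) := by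
      conv_lhs => rw [← List.take_append_drop j.toNat y]
      rw [List.drop_eq_getElem_cons hjy]
      simp
    have hxdec : x = x.take j.toNat ++ [x[j.toNat]] ++ x.drop (j.toNat + 1) := by
      conv_lhs => rw [← List.take_append_drop j.toNat x]
      rw [List.drop_eq_getElem_cons hjn]
      simp
    refine ⟨y[j.toNat], hb, ?_, ?_⟩
    · rw [hget]
      intro heq
      apply hyx
      rw [hydec, hxdec, htake, hdrop, heq]
    · rw [hsl, hsr, ← htake, ← hdrop, ← hydec]
      exact hy

-- the per-key equivalence: no Hamming-1 neighbour iff every bucket has size 1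
lemma pvKey_eq (d : PySem.Dict (List Char) Int) (k : Int) (x : List Char)
    (hnd : d.keys.Nodup) (hmem : ∀ y ∈ d.keys, pvGood k y) (hx : x ∈ d.keys) :
    (!(pvHasNb d k x)) =
      (PySem.List.pyRange 0 k 1).all
        (fun j => (pvBuckets d.keys k).getD (j, pvMaskAt x j) 0 == 1) := by
  rw [Bool.eq_iff_iff]
  have hL : pvHasNb d k x = true ↔
      ∃ j ∈ PySem.List.pyRange 0 k 1, ∃ b ∈ pvBases,
        PySem.List.pyGetD x j ' ' ≠ b ∧
        (PySem.List.slice x none (some j) ++ [b] ++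
          PySem.List.slice x (some (j + 1)) none) ∈ d.keys := by
    simp [pvHasNb, List.any_eq_true, PySem.Dict.contains_iff_mem_keys]
  constructor
  · intro hno
    rw [Bool.not_eq_true'] at hno
    rw [List.all_eq_true]
    intro j hj
    rw [pvBuckets_getD, pvCount_flat _ _ _ _ hj, beq_iff_eq]
    have h1 : d.keys.countP (fun y => pvMaskAt y j == pvMaskAt x j) = 1 := by
      rw [pvCountP_eq_one _ _ x hnd hx (by simp)]
      intro y hy hmask
      by_contra hne
      have hyes : pvHasNb d k x = true := by
        rw [PySem.List.mem_pyRange_one] at hj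
        rw [hL]
        exact ⟨j, PySem.List.mem_pyRange_one.mpr hj, (pvBridge d.keys k x j hmem hx hj.1 hj.2).mpr
          ⟨y, hy, hne, by simpa using hmask⟩⟩
      rw [hno] at hyes
      cases hyes
    exact_mod_cast h1
  · intro hall
    rw [Bool.not_eq_true']
    by_contra hyes
    rw [Bool.not_eq_false, hL] at hyes
    obtain ⟨j, hj, hex⟩ := hyes
    rw [List.all_eq_true] at hall
    have hb := hall j hj
    rw [pvBuckets_getD, pvCount_flat _ _ _ _ hj, beq_iff_eq] at hb
    have h1 : d.keys.countP (fun y => pvMaskAt y j == pvMaskAt x j) = 1 := by exact_mod_cast hb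
    rw [pvCountP_eq_one _ _ x hnd hx (by simp)] at h1
    rw [PySem.List.mem_pyRange_one] at hj
    obtain ⟨y, hy, hne, hmask⟩ := (pvBridge d.keys k x j hmem hx hj.1 hj.2).mp hex
    exact hne (h1 y hy (by simpa using hmask))

-- phase 2: A's counting loop equals B's counting loop on the same key list
lemma pvPhase2 (k : Int) (d : PySem.Dict (List Char) Int)
    (hnd : d.keys.Nodup) (hmem : ∀ y ∈ d.keys, pvGood k y) :
    d.keys.foldl (fun num key_kmer =>
      if ((PySem.List.pyRange 0 k 1).foldl (fun nc j =>
          if nc == 1 then nc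
          else
            ['A', 'T', 'C', 'G'].foldl (fun nc base =>
              if nc == 1 then nc
              else if PySem.List.pyGetD key_kmer j ' ' ≠ base then
                (if d.contains (PySem.List.slice key_kmer none (some j) ++ [base] ++
                    PySem.List.slice key_kmer (some (j + 1)) none) then 1 else nc)
              else nc) nc) (0 : Int) == 0) then num + 1 else num) (0 : Int)
    = d.keys.foldl (fun num key =>
        if (PySem.List.pyRange 0 k 1).all
            (fun j => (pvBuckets d.keys k).getD (j, pvMaskAt key j) 0 == 1) then num + 1
        else num) (0 : Int) := by
  apply PySem.List.foldl_congr_mem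
  intro acc x hx
  rw [pvNcEq d k x]
  have hkey := pvKey_eq d k x hnd hmem hx
  have hcond : ((if pvHasNb d k x then (1 : Int) else 0) == 0) =
      (PySem.List.pyRange 0 k 1).all
        (fun j => (pvBuckets d.keys k).getD (j, pvMaskAt x j) 0 == 1) := by
    rw [← hkey]
    cases hpv : pvHasNb d k x <;> simp
  rw [hcond]

-- the two first loops as folds over the window list
lemma pvFoldA_windows (cs : List Char) (k : Int) :
    (PySem.List.pyRange 0 ((cs.length : Int) - k + 1) 1).foldl (fun d i =>
      if d.contains (PySem.List.slice cs (some i) (some (i + k))) then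
        (d.modify (PySem.List.slice cs (some i) (some (i + k))) 0 (· + 1)).modify
          (rev_comp (PySem.List.slice cs (some i) (some (i + k)))) 0 (· + 1)
      else
        (d.insert (PySem.List.slice cs (some i) (some (i + k))) 0).insert
          (rev_comp (PySem.List.slice cs (some i) (some (i + k)))) 0) PySem.Dict.empty
    = (pvWindows cs k).foldl pvStepA PySem.Dict.empty := by
  unfold pvWindows
  rw [List.foldl_map]
  rfl

lemma pvFoldB_windows (cs : List Char) (k : Int) :
    (PySem.List.pyRange 0 ((cs.length : Int) - k + 1) 1).foldl (fun s i =>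
      PySem.Set.add (PySem.Set.add s (PySem.List.slice cs (some i) (some (i + k))))
        (rev_comp_alt (PySem.List.slice cs (some i) (some (i + k))))) PySem.Set.empty
    = (pvWindows cs k).foldl pvStepB PySem.Set.empty := by
  unfold pvWindows
  rw [List.foldl_map]
  rfl

-- ===== VERDICT (by name: the statement is the Claim_ definition above) =====
theorem num_distinct_kmers_spec : Claim_equal_num_distinct_kmers := by
  intro seq k hdom hpre
  unfold Spec_num_distinct_kmers num_distinct_kmers num_distinct_kmers_alt
  simp only [pvFoldA_windows, pvFoldB_windows]
  have hinv : pvInv k ((pvWindows seq.toList k).foldl pvStepA PySem.Dict.empty)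
      ((pvWindows seq.toList k).foldl pvStepB PySem.Set.empty) := by
    apply pvInv_foldl _ (pvWindows_good hpre)
    refine ⟨by simp [PySem.Dict.keys_empty, PySem.Set.empty], List.nodup_nil, ?_⟩
    intro y hy
    cases hy
  obtain ⟨hkeys, hnd', hmem'⟩ := hinv
  rw [← hkeys]
  set dA := (pvWindows seq.toList k).foldl pvStepA PySem.Dict.empty with hdA
  have hnd : dA.keys.Nodup := by rw [hkeys]; exact hnd'
  have hmem : ∀ y ∈ dA.keys, pvGood k y := by
    intro y hy
    rw [hkeys] at hy
    exact (hmem' y hy).1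
  rw [Prod.mk.injEq]
  refine ⟨?_, ?_⟩
  · -- sizes
    show ((dA.size : Nat) : Int) = PySem.Set.len dA.keys
    simp [PySem.Dict.size, PySem.Dict.keys, PySem.Set.len]
  · -- counts
    exact pvPhase2 k dA hnd hmem
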